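-- pv_equiv track=rewrite | github.com/erizov/cursor-github-mvp | scripts/generate_prompts.py | get_algorithm_type_from_algorithm
-- ===== SOURCE A (Python) =====
-- def get_algorithm_type_from_algorithm(algorithm: str) -> str:
--     """Map algorithm name to algorithm type category."""
--     alg_lower = algorithm.lower()
--     if any(x in alg_lower for x in ["logistic", "svm", "random forest (classification)", "naive bayes", "knn"]) and "regression" not in alg_lower:
--         return "Classification"
--     elif any(x in alg_lower for x in ["linear regression", "random forest (regression)"]):
--         return "Regression"
--     elif any(x in alg_lower for x in ["k-means", "dbscan"]):
--         return "Clustering"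
--     elif any(x in alg_lower for x in ["pca", "t-sne", "umap"]):
--         return "Dimensionality Reduction"
--     elif any(x in alg_lower for x in ["arima", "prophet"]):
--         return "Time Series"
--     elif any(x in alg_lower for x in ["lstm", "temporal cnn"]):
--         return "Sequence Models"
--     elif any(x in alg_lower for x in ["bert", "roberta", "text"]):
--         return "NLP"
--     elif any(x in alg_lower for x in ["object detection", "yolo", "faster r-cnn"]):
--         return "Computer Vision Detection"
--     elif any(x in alg_lower for x in ["cnn", "vision"]) and "detection" not in alg_lower:
--         return "Vision"
--     elif any(x in alg_lower for x in ["anomaly", "isolation forest", "one-class"]):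
--         return "Anomaly Detection"
--     elif any(x in alg_lower for x in ["recsys", "recommend", "matrix factorization", "two-tower"]):
--         return "Recommender Systems"
--     elif any(x in alg_lower for x in ["reinforcement", "dqn", "ppo"]):
--         return "Reinforcement Learning"
--     elif any(x in alg_lower for x in ["causal", "dowhy", "ate"]):
--         return "Causal Inference"
--     elif "gradient boosting" in alg_lower or "xgboost" in alg_lower or "lightgbm" in alg_lower or "catboost" in alg_lower:
--         return "Ensemble Methods"
--     elif any(x in alg_lower for x in ["optimization", "genetic", "simulated annealing"]):
--         return "Optimization"
--     elif any(x in alg_lower for x in ["graph", "gnn", "graph neural"]):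
--         return "Graph Algorithms"
--     elif any(x in alg_lower for x in ["transfer", "fine-tun", "pretrain"]):
--         return "Transfer Learning"
--     elif any(x in alg_lower for x in ["gan", "vae", "generative", "diffusion"]):
--         return "Generative Models"
--     elif any(x in alg_lower for x in ["generation", "summariz", "text generation"]):
--         return "Natural Language Generation"
--     elif any(x in alg_lower for x in ["feature engineering", "feature selection", "feature extraction"]):
--         return "Feature Engineering"
--     elif any(x in alg_lower for x in ["deep learning", "neural network", "dnn", "mlp"]):
--         return "Deep Learning"
--     elif any(x in alg_lower for x in ["segmentation", "semantic segmentation", "instance segmentation"]):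
--         return "Computer Vision Segmentation"
--     elif any(x in alg_lower for x in ["multi-modal", "multimodal", "cross-modal"]):
--         return "Multi-modal Learning"
--     elif any(x in alg_lower for x in ["automl", "auto-ml", "automated machine learning", "neural architecture search"]):
--         return "AutoML"
--     else:
--         # Default to Classification instead of "Other"
--         return "Other"
-- ===== SOURCE B (Python) =====
-- # B: flat keyword->(priority, category, excluded-keyword) map; one pass over ALL keywords
-- # keeping the minimum-priority match (no ordered cascade / early return as in A).
-- _KW = {
--     'logistic': (0, 'Classification', 'regression'),
--     'svm': (0, 'Classification', 'regression'),
--     'random forest (classification)': (0, 'Classification', 'regression'),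
--     'naive bayes': (0, 'Classification', 'regression'),
--     'knn': (0, 'Classification', 'regression'),
--     'linear regression': (1, 'Regression', None),
--     'random forest (regression)': (1, 'Regression', None),
--     'k-means': (2, 'Clustering', None),
--     'dbscan': (2, 'Clustering', None),
--     'pca': (3, 'Dimensionality Reduction', None),
--     't-sne': (3, 'Dimensionality Reduction', None),
--     'umap': (3, 'Dimensionality Reduction', None),
--     'arima': (4, 'Time Series', None),
--     'prophet': (4, 'Time Series', None),
--     'lstm': (5, 'Sequence Models', None),
--     'temporal cnn': (5, 'Sequence Models', None),
--     'bert': (6, 'NLP', None),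
--     'roberta': (6, 'NLP', None),
--     'text': (6, 'NLP', None),
--     'object detection': (7, 'Computer Vision Detection', None),
--     'yolo': (7, 'Computer Vision Detection', None),
--     'faster r-cnn': (7, 'Computer Vision Detection', None),
--     'cnn': (8, 'Vision', 'detection'),
--     'vision': (8, 'Vision', 'detection'),
--     'anomaly': (9, 'Anomaly Detection', None),
--     'isolation forest': (9, 'Anomaly Detection', None),
--     'one-class': (9, 'Anomaly Detection', None),
--     'recsys': (10, 'Recommender Systems', None),
--     'recommend': (10, 'Recommender Systems', None),
--     'matrix factorization': (10, 'Recommender Systems', None),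
--     'two-tower': (10, 'Recommender Systems', None),
--     'reinforcement': (11, 'Reinforcement Learning', None),
--     'dqn': (11, 'Reinforcement Learning', None),
--     'ppo': (11, 'Reinforcement Learning', None),
--     'causal': (12, 'Causal Inference', None),
--     'dowhy': (12, 'Causal Inference', None),
--     'ate': (12, 'Causal Inference', None),
--     'gradient boosting': (13, 'Ensemble Methods', None),
--     'xgboost': (13, 'Ensemble Methods', None),
--     'lightgbm': (13, 'Ensemble Methods', None),
--     'catboost': (13, 'Ensemble Methods', None),
--     'optimization': (14, 'Optimization', None),
--     'genetic': (14, 'Optimization', None),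
--     'simulated annealing': (14, 'Optimization', None),
--     'graph': (15, 'Graph Algorithms', None),
--     'gnn': (15, 'Graph Algorithms', None),
--     'graph neural': (15, 'Graph Algorithms', None),
--     'transfer': (16, 'Transfer Learning', None),
--     'fine-tun': (16, 'Transfer Learning', None),
--     'pretrain': (16, 'Transfer Learning', None),
--     'gan': (17, 'Generative Models', None),
--     'vae': (17, 'Generative Models', None),
--     'generative': (17, 'Generative Models', None),
--     'diffusion': (17, 'Generative Models', None),
--     'generation': (18, 'Natural Language Generation', None),
--     'summariz': (18, 'Natural Language Generation', None),
--     'text generation': (18, 'Natural Language Generation', None),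
--     'feature engineering': (19, 'Feature Engineering', None),
--     'feature selection': (19, 'Feature Engineering', None),
--     'feature extraction': (19, 'Feature Engineering', None),
--     'deep learning': (20, 'Deep Learning', None),
--     'neural network': (20, 'Deep Learning', None),
--     'dnn': (20, 'Deep Learning', None),
--     'mlp': (20, 'Deep Learning', None),
--     'segmentation': (21, 'Computer Vision Segmentation', None),
--     'semantic segmentation': (21, 'Computer Vision Segmentation', None),
--     'instance segmentation': (21, 'Computer Vision Segmentation', None),
--     'multi-modal': (22, 'Multi-modal Learning', None),
--     'multimodal': (22, 'Multi-modal Learning', None),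
--     'cross-modal': (22, 'Multi-modal Learning', None),
--     'automl': (23, 'AutoML', None),
--     'auto-ml': (23, 'AutoML', None),
--     'automated machine learning': (23, 'AutoML', None),
--     'neural architecture search': (23, 'AutoML', None),
-- }
--
-- def get_algorithm_type_from_algorithm(algorithm: str) -> str:
--     """Map algorithm name to algorithm type category."""
--     al = algorithm.lower()
--     best = None
--     for kw, (p, cat, excl) in _KW.items():
--         if kw in al and (excl is None or excl not in al):
--             if best is None or p < best[0]:
--                 best = (p, cat)
--     return best[1] if best is not None else "Other"
-- ===== Notes on version B (the rewrite author's own statement) =====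
-- stated objective: alternative
-- what changed: Replaces A's ordered 25-branch first-match if/elif cascade (early return) by a single pass over a flat keyword-to-(priority, category, excluded-keyword) map that keeps the minimum-priority matching entry.
import Mathlib
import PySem

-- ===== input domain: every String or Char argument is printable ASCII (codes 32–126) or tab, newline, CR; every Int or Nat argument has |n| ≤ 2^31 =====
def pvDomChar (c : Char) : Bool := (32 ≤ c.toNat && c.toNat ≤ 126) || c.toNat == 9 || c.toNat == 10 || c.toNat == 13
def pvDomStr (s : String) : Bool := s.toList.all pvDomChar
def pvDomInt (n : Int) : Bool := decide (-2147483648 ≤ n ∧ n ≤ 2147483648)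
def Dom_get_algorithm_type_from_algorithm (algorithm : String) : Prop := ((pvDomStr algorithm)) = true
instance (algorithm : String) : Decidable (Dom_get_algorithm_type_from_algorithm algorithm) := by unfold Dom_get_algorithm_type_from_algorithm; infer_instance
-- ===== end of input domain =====

-- B replaces A's ordered 25-branch keyword cascade (first match, early return) by a single pass
-- over a flat keyword → (priority, category, excluded-keyword) map keeping the minimum-priority
-- match (objective: alternative decomposition, same behaviour).

-- ===== PORT A =====
-- literal transliteration of A's if/elif cascade; 'x in alg_lower' = PySem.Str.isIn
def get_algorithm_type_from_algorithm (algorithm : String) : String :=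
  let alg_lower := PySem.Str.lower algorithm
  if (["logistic", "svm", "random forest (classification)", "naive bayes", "knn"].any (fun x => PySem.Str.isIn x alg_lower)) && !(PySem.Str.isIn "regression" alg_lower) then "Classification"
  else if ["linear regression", "random forest (regression)"].any (fun x => PySem.Str.isIn x alg_lower) then "Regression"
  else if ["k-means", "dbscan"].any (fun x => PySem.Str.isIn x alg_lower) then "Clustering"
  else if ["pca", "t-sne", "umap"].any (fun x => PySem.Str.isIn x alg_lower) then "Dimensionality Reduction"
  else if ["arima", "prophet"].any (fun x => PySem.Str.isIn x alg_lower) then "Time Series"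
  else if ["lstm", "temporal cnn"].any (fun x => PySem.Str.isIn x alg_lower) then "Sequence Models"
  else if ["bert", "roberta", "text"].any (fun x => PySem.Str.isIn x alg_lower) then "NLP"
  else if ["object detection", "yolo", "faster r-cnn"].any (fun x => PySem.Str.isIn x alg_lower) then "Computer Vision Detection"
  else if (["cnn", "vision"].any (fun x => PySem.Str.isIn x alg_lower)) && !(PySem.Str.isIn "detection" alg_lower) then "Vision"
  else if ["anomaly", "isolation forest", "one-class"].any (fun x => PySem.Str.isIn x alg_lower) then "Anomaly Detection"
  else if ["recsys", "recommend", "matrix factorization", "two-tower"].any (fun x => PySem.Str.isIn x alg_lower) then "Recommender Systems"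
  else if ["reinforcement", "dqn", "ppo"].any (fun x => PySem.Str.isIn x alg_lower) then "Reinforcement Learning"
  else if ["causal", "dowhy", "ate"].any (fun x => PySem.Str.isIn x alg_lower) then "Causal Inference"
  else if PySem.Str.isIn "gradient boosting" alg_lower || PySem.Str.isIn "xgboost" alg_lower || PySem.Str.isIn "lightgbm" alg_lower || PySem.Str.isIn "catboost" alg_lower then "Ensemble Methods"
  else if ["optimization", "genetic", "simulated annealing"].any (fun x => PySem.Str.isIn x alg_lower) then "Optimization"
  else if ["graph", "gnn", "graph neural"].any (fun x => PySem.Str.isIn x alg_lower) then "Graph Algorithms"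
  else if ["transfer", "fine-tun", "pretrain"].any (fun x => PySem.Str.isIn x alg_lower) then "Transfer Learning"
  else if ["gan", "vae", "generative", "diffusion"].any (fun x => PySem.Str.isIn x alg_lower) then "Generative Models"
  else if ["generation", "summariz", "text generation"].any (fun x => PySem.Str.isIn x alg_lower) then "Natural Language Generation"
  else if ["feature engineering", "feature selection", "feature extraction"].any (fun x => PySem.Str.isIn x alg_lower) then "Feature Engineering"
  else if ["deep learning", "neural network", "dnn", "mlp"].any (fun x => PySem.Str.isIn x alg_lower) then "Deep Learning"
  else if ["segmentation", "semantic segmentation", "instance segmentation"].any (fun x => PySem.Str.isIn x alg_lower) then "Computer Vision Segmentation"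
  else if ["multi-modal", "multimodal", "cross-modal"].any (fun x => PySem.Str.isIn x alg_lower) then "Multi-modal Learning"
  else if ["automl", "auto-ml", "automated machine learning", "neural architecture search"].any (fun x => PySem.Str.isIn x alg_lower) then "AutoML"
  else "Other"

-- ===== PORT B =====
-- Source B's flat _KW map in insertion order: entry = (keyword, priority, category, excluded keyword)
def pvKW : List (String × Nat × String × Option String) :=
  [
    ("logistic", 0, "Classification", some "regression"),
    ("svm", 0, "Classification", some "regression"),
    ("random forest (classification)", 0, "Classification", some "regression"),
    ("naive bayes", 0, "Classification", some "regression"),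
    ("knn", 0, "Classification", some "regression"),
    ("linear regression", 1, "Regression", none),
    ("random forest (regression)", 1, "Regression", none),
    ("k-means", 2, "Clustering", none),
    ("dbscan", 2, "Clustering", none),
    ("pca", 3, "Dimensionality Reduction", none),
    ("t-sne", 3, "Dimensionality Reduction", none),
    ("umap", 3, "Dimensionality Reduction", none),
    ("arima", 4, "Time Series", none),
    ("prophet", 4, "Time Series", none),
    ("lstm", 5, "Sequence Models", none),
    ("temporal cnn", 5, "Sequence Models", none),
    ("bert", 6, "NLP", none),
    ("roberta", 6, "NLP", none),
    ("text", 6, "NLP", none),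
    ("object detection", 7, "Computer Vision Detection", none),
    ("yolo", 7, "Computer Vision Detection", none),
    ("faster r-cnn", 7, "Computer Vision Detection", none),
    ("cnn", 8, "Vision", some "detection"),
    ("vision", 8, "Vision", some "detection"),
    ("anomaly", 9, "Anomaly Detection", none),
    ("isolation forest", 9, "Anomaly Detection", none),
    ("one-class", 9, "Anomaly Detection", none),
    ("recsys", 10, "Recommender Systems", none),
    ("recommend", 10, "Recommender Systems", none),
    ("matrix factorization", 10, "Recommender Systems", none),
    ("two-tower", 10, "Recommender Systems", none),
    ("reinforcement", 11, "Reinforcement Learning", none),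
    ("dqn", 11, "Reinforcement Learning", none),
    ("ppo", 11, "Reinforcement Learning", none),
    ("causal", 12, "Causal Inference", none),
    ("dowhy", 12, "Causal Inference", none),
    ("ate", 12, "Causal Inference", none),
    ("gradient boosting", 13, "Ensemble Methods", none),
    ("xgboost", 13, "Ensemble Methods", none),
    ("lightgbm", 13, "Ensemble Methods", none),
    ("catboost", 13, "Ensemble Methods", none),
    ("optimization", 14, "Optimization", none),
    ("genetic", 14, "Optimization", none),
    ("simulated annealing", 14, "Optimization", none),
    ("graph", 15, "Graph Algorithms", none),
    ("gnn", 15, "Graph Algorithms", none),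
    ("graph neural", 15, "Graph Algorithms", none),
    ("transfer", 16, "Transfer Learning", none),
    ("fine-tun", 16, "Transfer Learning", none),
    ("pretrain", 16, "Transfer Learning", none),
    ("gan", 17, "Generative Models", none),
    ("vae", 17, "Generative Models", none),
    ("generative", 17, "Generative Models", none),
    ("diffusion", 17, "Generative Models", none),
    ("generation", 18, "Natural Language Generation", none),
    ("summariz", 18, "Natural Language Generation", none),
    ("text generation", 18, "Natural Language Generation", none),
    ("feature engineering", 19, "Feature Engineering", none),
    ("feature selection", 19, "Feature Engineering", none),
    ("feature extraction", 19, "Feature Engineering", none),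
    ("deep learning", 20, "Deep Learning", none),
    ("neural network", 20, "Deep Learning", none),
    ("dnn", 20, "Deep Learning", none),
    ("mlp", 20, "Deep Learning", none),
    ("segmentation", 21, "Computer Vision Segmentation", none),
    ("semantic segmentation", 21, "Computer Vision Segmentation", none),
    ("instance segmentation", 21, "Computer Vision Segmentation", none),
    ("multi-modal", 22, "Multi-modal Learning", none),
    ("multimodal", 22, "Multi-modal Learning", none),
    ("cross-modal", 22, "Multi-modal Learning", none),
    ("automl", 23, "AutoML", none),
    ("auto-ml", 23, "AutoML", none),
    ("automated machine learning", 23, "AutoML", none),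
    ("neural architecture search", 23, "AutoML", none) ]

-- Source B's loop: single pass, keep the minimum-priority matching entry ('best'); "Other" if none
def get_algorithm_type_from_algorithm_alt (algorithm : String) : String :=
  let al := PySem.Str.lower algorithm
  let best := pvKW.foldl (fun best e =>
    if PySem.Str.isIn e.1 al &&
       (match e.2.2.2 with | none => true | some ex => !(PySem.Str.isIn ex al)) then
      match best with
      | none => some (e.2.1, e.2.2.1)
      | some b => if e.2.1 < b.1 then some (e.2.1, e.2.2.1) else best
    else best) none
  match best with
  | some b => b.2
  | none => "Other"

-- ===== PRECONDITION & SPEC =====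
def Spec_get_algorithm_type_from_algorithm (algorithm : String) (out : String) : Prop := out = get_algorithm_type_from_algorithm_alt algorithm
instance (algorithm : String) (out : String) : Decidable (Spec_get_algorithm_type_from_algorithm algorithm out) := by unfold Spec_get_algorithm_type_from_algorithm; infer_instance

-- ===== CLAIM (what is proved, stated in full; the proofs are below) =====
def Claim_equal_get_algorithm_type_from_algorithm : Prop := ∀ (algorithm : String), Dom_get_algorithm_type_from_algorithm algorithm → Spec_get_algorithm_type_from_algorithm algorithm (get_algorithm_type_from_algorithm algorithm)

-- ===== LEMMAS AND PROOFS =====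

-- A's cascade seen as a rule table: (keywords, optional excluded keyword, category), in branch order
def pvRulesT : List (List String × Option String × String) :=
  [
    (["logistic", "svm", "random forest (classification)", "naive bayes", "knn"], some "regression", "Classification"),
    (["linear regression", "random forest (regression)"], none, "Regression"),
    (["k-means", "dbscan"], none, "Clustering"),
    (["pca", "t-sne", "umap"], none, "Dimensionality Reduction"),
    (["arima", "prophet"], none, "Time Series"),
    (["lstm", "temporal cnn"], none, "Sequence Models"),
    (["bert", "roberta", "text"], none, "NLP"),
    (["object detection", "yolo", "faster r-cnn"], none, "Computer Vision Detection"),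
    (["cnn", "vision"], some "detection", "Vision"),
    (["anomaly", "isolation forest", "one-class"], none, "Anomaly Detection"),
    (["recsys", "recommend", "matrix factorization", "two-tower"], none, "Recommender Systems"),
    (["reinforcement", "dqn", "ppo"], none, "Reinforcement Learning"),
    (["causal", "dowhy", "ate"], none, "Causal Inference"),
    (["gradient boosting", "xgboost", "lightgbm", "catboost"], none, "Ensemble Methods"),
    (["optimization", "genetic", "simulated annealing"], none, "Optimization"),
    (["graph", "gnn", "graph neural"], none, "Graph Algorithms"),
    (["transfer", "fine-tun", "pretrain"], none, "Transfer Learning"),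
    (["gan", "vae", "generative", "diffusion"], none, "Generative Models"),
    (["generation", "summariz", "text generation"], none, "Natural Language Generation"),
    (["feature engineering", "feature selection", "feature extraction"], none, "Feature Engineering"),
    (["deep learning", "neural network", "dnn", "mlp"], none, "Deep Learning"),
    (["segmentation", "semantic segmentation", "instance segmentation"], none, "Computer Vision Segmentation"),
    (["multi-modal", "multimodal", "cross-modal"], none, "Multi-modal Learning"),
    (["automl", "auto-ml", "automated machine learning", "neural architecture search"], none, "AutoML") ]

-- does a rule fire? (some keyword occurs, and the excluded keyword, if any, does not)
def pvPred (al : String) (r : List String × Option String × String) : Bool :=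
  (r.1.any (fun k => PySem.Str.isIn k al)) &&
  (match r.2.1 with | none => true | some ex => !(PySem.Str.isIn ex al))

-- A's control flow: category of the first rule that fires, else "Other"
def pvCascade (al : String) : List (List String × Option String × String) → String
  | [] => "Other"
  | r :: rs => if pvPred al r then r.2.2 else pvCascade al rs

-- first firing rule together with its index (counting from n)
def pvFirst (al : String) (n : Nat) : List (List String × Option String × String) → Option (Nat × String)
  | [] => none
  | r :: rs => if pvPred al r then some (n, r.2.2) else pvFirst al (n + 1) rs

-- flattening the table into B's entries, indexing rules from n
def pvFlatten (n : Nat) : List (List String × Option String × String) → List (String × Nat × String × Option String)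
  | [] => []
  | r :: rs => r.1.map (fun k => (k, n, r.2.2, r.2.1)) ++ pvFlatten (n + 1) rs

-- B's loop body, named
def pvStep (al : String) (best : Option (Nat × String)) (e : String × Nat × String × Option String) : Option (Nat × String) :=
  if PySem.Str.isIn e.1 al &&
     (match e.2.2.2 with | none => true | some ex => !(PySem.Str.isIn ex al)) then
    match best with
    | none => some (e.2.1, e.2.2.1)
    | some b => if e.2.1 < b.1 then some (e.2.1, e.2.2.1) else best
  else best

theorem pvKW_eq_flatten : pvKW = pvFlatten 0 pvRulesT := by rfl

theorem pvFlatten_idx : ∀ (rs : List (List String × Option String × String)) (n : Nat)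
    (e : String × Nat × String × Option String), e ∈ pvFlatten n rs → n ≤ e.2.1 := by
  intro rs
  induction rs with
  | nil => intro n e h; simp [pvFlatten] at h
  | cons r rs ih =>
    intro n e h
    simp only [pvFlatten, List.mem_append, List.mem_map] at h
    rcases h with ⟨k, _, rfl⟩ | h
    · exact le_refl n
    · exact Nat.le_of_succ_le (ih (n + 1) e h)

theorem pvRun_skip (al : String) : ∀ (es : List (String × Nat × String × Option String)) (b : Nat × String),
    (∀ e ∈ es, b.1 ≤ e.2.1) → es.foldl (pvStep al) (some b) = some b := by
  intro es
  induction es with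
  | nil => intro b _; rfl
  | cons e es ih =>
    intro b hb
    have h1 : b.1 ≤ e.2.1 := hb e (List.mem_cons_self ..)
    have hstep : pvStep al (some b) e = some b := by
      unfold pvStep
      have : ¬ e.2.1 < b.1 := Nat.not_lt.mpr h1
      simp [this]
    simp only [List.foldl_cons, hstep]
    exact ih b (fun e' he' => hb e' (List.mem_cons_of_mem _ he'))

theorem pvRun_rule (al : String) (ex : Option String) (c : String) :
    ∀ (kws : List String) (n : Nat),
    (kws.map (fun k => (k, n, c, ex))).foldl (pvStep al) none =
      if pvPred al (kws, ex, c) then some (n, c) else none := by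
  intro kws
  induction kws with
  | nil => intro n; simp [pvPred]
  | cons k ks ih =>
    intro n
    have hrest : (ks.map (fun k => (k, n, c, ex))).foldl (pvStep al) (some (n, c)) = some (n, c) := by
      apply pvRun_skip
      intro e he
      simp only [List.mem_map] at he
      rcases he with ⟨k', _, rfl⟩
      exact le_refl n
    cases ex with
    | none =>
      by_cases hk : PySem.Chars.isIn k.toList al.toList = true
      · have hstep : pvStep al none (k, n, c, none) = some (n, c) := by
          simp [pvStep, PySem.Str.isIn, hk]
        have hpred : pvPred al (k :: ks, none, c) = true := by
          simp [pvPred, PySem.Str.isIn, hk]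
        simp [hstep, hrest, hpred]
      · have hk' : PySem.Chars.isIn k.toList al.toList = false := Bool.eq_false_iff.mpr hk
        have hstep : pvStep al none (k, n, c, (none : Option String)) = none := by
          simp [pvStep, PySem.Str.isIn, hk']
        have hpred : pvPred al (k :: ks, none, c) = pvPred al (ks, none, c) := by
          simp [pvPred, PySem.Str.isIn, List.any_cons, hk']
        simp only [List.map_cons, List.foldl_cons, hstep, hpred]
        exact ih n
    | some e =>
      by_cases he : PySem.Chars.isIn e.toList al.toList = true
      · have hstep : pvStep al none (k, n, c, some e) = none := by
          simp [pvStep, PySem.Str.isIn, he]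
        have hpred : pvPred al (k :: ks, some e, c) = pvPred al (ks, some e, c) := by
          simp [pvPred, PySem.Str.isIn, he]
        simp only [List.map_cons, List.foldl_cons, hstep, hpred]
        exact ih n
      · have he' : PySem.Chars.isIn e.toList al.toList = false := Bool.eq_false_iff.mpr he
        by_cases hk : PySem.Chars.isIn k.toList al.toList = true
        · have hstep : pvStep al none (k, n, c, some e) = some (n, c) := by
            simp [pvStep, PySem.Str.isIn, hk, he']
          have hpred : pvPred al (k :: ks, some e, c) = true := by
            simp [pvPred, PySem.Str.isIn, hk, he']
          simp [hstep, hrest, hpred]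
        · have hk' : PySem.Chars.isIn k.toList al.toList = false := Bool.eq_false_iff.mpr hk
          have hstep : pvStep al none (k, n, c, some e) = none := by
            simp [pvStep, PySem.Str.isIn, hk']
          have hpred : pvPred al (k :: ks, some e, c) = pvPred al (ks, some e, c) := by
            simp [pvPred, PySem.Str.isIn, List.any_cons, hk']
          simp only [List.map_cons, List.foldl_cons, hstep, hpred]
          exact ih n

theorem pvRun_flatten (al : String) : ∀ (rs : List (List String × Option String × String)) (n : Nat),
    (pvFlatten n rs).foldl (pvStep al) none = pvFirst al n rs := by
  intro rs
  induction rs with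
  | nil => intro n; rfl
  | cons r rs ih =>
    intro n
    obtain ⟨kws, ex, c⟩ := r
    simp only [pvFlatten, List.foldl_append]
    rw [pvRun_rule al ex c kws n]
    by_cases hp : pvPred al (kws, ex, c) = true
    · rw [if_pos hp]
      have : (pvFlatten (n + 1) rs).foldl (pvStep al) (some (n, c)) = some (n, c) := by
        apply pvRun_skip
        intro e he
        exact Nat.le_of_succ_le (pvFlatten_idx rs (n + 1) e he)
      rw [this]
      simp [pvFirst, hp]
    · rw [if_neg hp, ih (n + 1)]
      simp [pvFirst, hp]

theorem pvFirst_cascade (al : String) : ∀ (rs : List (List String × Option String × String)) (n : Nat),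
    (match pvFirst al n rs with | some b => b.2 | none => "Other") = pvCascade al rs := by
  intro rs
  induction rs with
  | nil => intro n; rfl
  | cons r rs ih =>
    intro n
    by_cases hp : pvPred al r = true
    · simp [pvFirst, pvCascade, hp]
    · simp only [pvFirst, pvCascade]
      rw [if_neg hp, if_neg hp]
      exact ih (n + 1)

-- A's literal cascade IS pvCascade on the table (both sides reduce to the same if-tree)
theorem pvA_cascade (al : String) :
    (let alg_lower := al
     if (["logistic", "svm", "random forest (classification)", "naive bayes", "knn"].any (fun x => PySem.Str.isIn x alg_lower)) && !(PySem.Str.isIn "regression" alg_lower) then "Classification"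
     else if ["linear regression", "random forest (regression)"].any (fun x => PySem.Str.isIn x alg_lower) then "Regression"
     else if ["k-means", "dbscan"].any (fun x => PySem.Str.isIn x alg_lower) then "Clustering"
     else if ["pca", "t-sne", "umap"].any (fun x => PySem.Str.isIn x alg_lower) then "Dimensionality Reduction"
     else if ["arima", "prophet"].any (fun x => PySem.Str.isIn x alg_lower) then "Time Series"
     else if ["lstm", "temporal cnn"].any (fun x => PySem.Str.isIn x alg_lower) then "Sequence Models"
     else if ["bert", "roberta", "text"].any (fun x => PySem.Str.isIn x alg_lower) then "NLP"
     else if ["object detection", "yolo", "faster r-cnn"].any (fun x => PySem.Str.isIn x alg_lower) then "Computer Vision Detection"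
     else if (["cnn", "vision"].any (fun x => PySem.Str.isIn x alg_lower)) && !(PySem.Str.isIn "detection" alg_lower) then "Vision"
     else if ["anomaly", "isolation forest", "one-class"].any (fun x => PySem.Str.isIn x alg_lower) then "Anomaly Detection"
     else if ["recsys", "recommend", "matrix factorization", "two-tower"].any (fun x => PySem.Str.isIn x alg_lower) then "Recommender Systems"
     else if ["reinforcement", "dqn", "ppo"].any (fun x => PySem.Str.isIn x alg_lower) then "Reinforcement Learning"
     else if ["causal", "dowhy", "ate"].any (fun x => PySem.Str.isIn x alg_lower) then "Causal Inference"
     else if PySem.Str.isIn "gradient boosting" alg_lower || PySem.Str.isIn "xgboost" alg_lower || PySem.Str.isIn "lightgbm" alg_lower || PySem.Str.isIn "catboost" alg_lower then "Ensemble Methods"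
     else if ["optimization", "genetic", "simulated annealing"].any (fun x => PySem.Str.isIn x alg_lower) then "Optimization"
     else if ["graph", "gnn", "graph neural"].any (fun x => PySem.Str.isIn x alg_lower) then "Graph Algorithms"
     else if ["transfer", "fine-tun", "pretrain"].any (fun x => PySem.Str.isIn x alg_lower) then "Transfer Learning"
     else if ["gan", "vae", "generative", "diffusion"].any (fun x => PySem.Str.isIn x alg_lower) then "Generative Models"
     else if ["generation", "summariz", "text generation"].any (fun x => PySem.Str.isIn x alg_lower) then "Natural Language Generation"
     else if ["feature engineering", "feature selection", "feature extraction"].any (fun x => PySem.Str.isIn x alg_lower) then "Feature Engineering"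
     else if ["deep learning", "neural network", "dnn", "mlp"].any (fun x => PySem.Str.isIn x alg_lower) then "Deep Learning"
     else if ["segmentation", "semantic segmentation", "instance segmentation"].any (fun x => PySem.Str.isIn x alg_lower) then "Computer Vision Segmentation"
     else if ["multi-modal", "multimodal", "cross-modal"].any (fun x => PySem.Str.isIn x alg_lower) then "Multi-modal Learning"
     else if ["automl", "auto-ml", "automated machine learning", "neural architecture search"].any (fun x => PySem.Str.isIn x alg_lower) then "AutoML"
     else "Other") = pvCascade al pvRulesT := by
  simp only [pvRulesT, pvCascade, pvPred, List.any, Bool.and_true, Bool.or_false, Bool.or_assoc]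

-- ===== VERDICT (by name: the statement is the Claim_ definition above) =====
theorem get_algorithm_type_from_algorithm_spec : Claim_equal_get_algorithm_type_from_algorithm := by
  intro algorithm _
  show get_algorithm_type_from_algorithm algorithm = get_algorithm_type_from_algorithm_alt algorithm
  unfold get_algorithm_type_from_algorithm get_algorithm_type_from_algorithm_alt
  rw [pvA_cascade (PySem.Str.lower algorithm)]
  have hfold : pvKW.foldl (pvStep (PySem.Str.lower algorithm)) none
      = pvFirst (PySem.Str.lower algorithm) 0 pvRulesT := by
    rw [pvKW_eq_flatten]; exact pvRun_flatten _ pvRulesT 0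
  show pvCascade (PySem.Str.lower algorithm) pvRulesT
      = (match pvKW.foldl (pvStep (PySem.Str.lower algorithm)) none with
         | some b => b.2 | none => "Other")
  rw [hfold, pvFirst_cascade (PySem.Str.lower algorithm) pvRulesT 0]
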